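-- pv_equiv track=rewrite | github.com/cas-bioinf/rboAnalyzer | rna_blast_analyze/BR_core/predict_structures.py | expand_ambiguous_RNA
-- ===== SOURCE A (Python) =====
-- def expand_ambiguous_RNA(rnaseq):
--     """
--     expand possibilities in ambigously encoded RNA sequence
--     with IUPAC code
--     :return:
--     """
--
--     iupac = IUPACmapping()
--
--     def spawn_branch(seqstr):
--         ns = []
--         for i, b, in enumerate(seqstr):
--             if b in iupac.ambiguous:
--                 rs = ''.join(ns)
--                 bb = []
--                 for j in iupac.rnamapping[b]:
--                     bb.append(rs + j + seqstr[i+1:])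
--                 return bb
--             else:
--                 ns.append(b)
--         return []
--
--     seqs = spawn_branch(rnaseq)
--     while len(seqs) > 0:
--         new_seqs = []
--         for seq in seqs:
--             new_seqs += spawn_branch(seq)
--
--         if len(new_seqs) == 0:
--             # comple enumeration in previous step
--             break
--         seqs = new_seqs
--
--     return seqs
--
-- class IUPACmapping(object):
--     """
--     holder for the IUPAC ambigues information
--     """
--     def __init__(self):
--         self.allowed_bases = tuple('ACGTURYSWKMBDHVN')
--         self.ambiguous = tuple('RYSWKMBDHVN')
--         self.unambiguous = tuple(set(self.allowed_bases) - set(self.ambiguous))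
--         self.mapping = {
--             # 'A': ('A',),
--             # 'C': ('C',),
--             # 'G': ('G',),
--             # 'T': ('T',),
--             # 'U': ('U',),
--             'R': ('A', 'G'),
--             'Y': ('C', 'T'),
--             'S': ('G', 'C'),
--             'W': ('A', 'T'),
--             'K': ('G', 'T'),
--             'M': ('A', 'C'),
--             'B': ('C', 'G', 'T'),
--             'D': ('A', 'G', 'T'),
--             'H': ('A', 'C', 'T'),
--             'V': ('A', 'C', 'G'),
--             'N': ('A', 'C', 'G', 'T')
--         }
--         self.rnamapping = self._RNAze()
--
--     def _RNAze(self):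
--         """
--         change the 'T' to 'U' in mapping
--         :return:
--         """
--         rnamapping = dict()
--         for key in self.mapping.keys():
--             if 'T' in self.mapping[key]:
--                 rnamapping[key] = tuple([i for i in self.mapping[key] if i != 'T'] + ['U'])
--             else:
--                 rnamapping[key] = self.mapping[key]
--         return rnamapping
-- ===== SOURCE B (Python) =====
-- _AMBIG = {
--     'R': ('A', 'G'),
--     'Y': ('C', 'U'),
--     'S': ('G', 'C'),
--     'W': ('A', 'U'),
--     'K': ('G', 'U'),
--     'M': ('A', 'C'),
--     'B': ('C', 'G', 'U'),
--     'D': ('A', 'G', 'U'),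
--     'H': ('A', 'C', 'U'),
--     'V': ('A', 'C', 'G'),
--     'N': ('A', 'C', 'G', 'U'),
-- }
--
--
-- def expand_ambiguous_RNA(rnaseq):
--     """Expand IUPAC-ambiguous RNA in one left-to-right product fold.
--
--     If the sequence contains no ambiguous base there is nothing to expand
--     and the result is empty.
--     """
--     out = ['']
--     ambiguous = False
--     for b in rnaseq:
--         opts = _AMBIG.get(b)
--         if opts is None:
--             opts = (b,)
--         else:
--             ambiguous = True
--         out = [p + o for p in out for o in opts]
--     return out if ambiguous else []
-- ===== Notes on version B (the rewrite author's own statement) =====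
-- stated objective: simpler
-- what changed: Replaced A's round-based expansion (a spawn_branch helper that re-scans every partially expanded sequence from the left inside a while-loop, one ambiguous base per round) with a single left-to-right fold that builds the cartesian product of per-position options while tracking whether any position was ambiguous, using a precomputed T->U option table instead of rebuilding the IUPAC mapping per call.
import Mathlib
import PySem

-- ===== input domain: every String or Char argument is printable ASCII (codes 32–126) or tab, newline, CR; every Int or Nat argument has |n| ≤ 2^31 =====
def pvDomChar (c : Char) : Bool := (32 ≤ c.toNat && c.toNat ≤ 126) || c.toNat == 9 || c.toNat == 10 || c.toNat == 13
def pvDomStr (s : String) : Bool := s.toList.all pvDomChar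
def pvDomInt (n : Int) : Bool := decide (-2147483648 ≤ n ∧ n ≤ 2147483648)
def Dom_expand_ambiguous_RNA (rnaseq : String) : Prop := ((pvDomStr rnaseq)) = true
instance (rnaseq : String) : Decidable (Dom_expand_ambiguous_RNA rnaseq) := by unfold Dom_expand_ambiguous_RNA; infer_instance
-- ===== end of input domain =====

-- B replaces A's round-based expansion (repeatedly re-scanning every partially expanded
-- sequence, one ambiguous base per round) with a single left-to-right product fold.

-- ===== PORT A =====
def pvA_ambiguous : List Char := ['R', 'Y', 'S', 'W', 'K', 'M', 'B', 'D', 'H', 'V', 'N']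

def pvA_mapping : PySem.Dict Char (List Char) := PySem.Dict.mk
  [('R', ['A', 'G']), ('Y', ['C', 'T']), ('S', ['G', 'C']), ('W', ['A', 'T']),
   ('K', ['G', 'T']), ('M', ['A', 'C']), ('B', ['C', 'G', 'T']), ('D', ['A', 'G', 'T']),
   ('H', ['A', 'C', 'T']), ('V', ['A', 'C', 'G']), ('N', ['A', 'C', 'G', 'T'])]

-- IUPACmapping._RNAze: replace 'T' by 'U' in every value (loop over keys, building a new dict)
def pvA_rnamapping : PySem.Dict Char (List Char) :=
  pvA_mapping.items.foldl
    (fun d kv =>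
      if 'T' ∈ kv.2 then d.insert kv.1 ((kv.2.filter (fun i => i ≠ 'T')) ++ ['U'])
      else d.insert kv.1 kv.2)
    PySem.Dict.empty

-- spawn_branch: scan left to right accumulating ns; at the first ambiguous base return all
-- one-step expansions (rnamapping[b] cannot KeyError: every ambiguous base is a key, so
-- .getD [] is exact here); if none is found return [].
def pvA_spawn : List Char → List Char → List String
  | [], _ns => []
  | b :: rest, ns =>
    if b ∈ pvA_ambiguous then
      ((pvA_rnamapping.get? b).getD []).foldl
        (fun bb j => bb ++ [String.ofList (ns ++ [j] ++ rest)]) []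
    else pvA_spawn rest (ns ++ [b])

-- the while-loop; fuel is only a totality guard (the loop runs at most once per ambiguous
-- base, ≤ length rounds, so length+1 fuel is never exhausted — proved in the lemmas below)
def pvA_loop : Nat → List String → List String
  | 0, seqs => seqs
  | fuel + 1, seqs =>
    if 0 < seqs.length then
      let new_seqs := seqs.foldl (fun acc seq => acc ++ pvA_spawn seq.toList []) []
      if new_seqs.length = 0 then seqs else pvA_loop fuel new_seqs
    else seqs

def expand_ambiguous_RNA (rnaseq : String) : List String :=
  pvA_loop (rnaseq.toList.length + 1) (pvA_spawn rnaseq.toList [])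

-- ===== PORT B =====
def pvB_ambig : PySem.Dict Char (List Char) := PySem.Dict.mk
  [('R', ['A', 'G']), ('Y', ['C', 'U']), ('S', ['G', 'C']), ('W', ['A', 'U']),
   ('K', ['G', 'U']), ('M', ['A', 'C']), ('B', ['C', 'G', 'U']), ('D', ['A', 'G', 'U']),
   ('H', ['A', 'C', 'U']), ('V', ['A', 'C', 'G']), ('N', ['A', 'C', 'G', 'U'])]

-- Source B's single fold over (out, ambiguous); partial sequences are kept as char lists and
-- packed with String.ofList at the end (exact: ''-concatenation of the same characters)
def expand_ambiguous_RNA_alt (rnaseq : String) : List String :=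
  let st := rnaseq.toList.foldl
      (fun st b =>
        match pvB_ambig.get? b with
        | none => (st.1.flatMap (fun p => ([b] : List Char).map (fun o => p ++ [o])), st.2)
        | some opts => (st.1.flatMap (fun p => opts.map (fun o => p ++ [o])), true))
      ([([] : List Char)], false)
  if st.2 then st.1.map String.ofList else []

-- ===== PRECONDITION & SPEC =====
def Spec_expand_ambiguous_RNA (rnaseq : String) (out : List String) : Prop := out = expand_ambiguous_RNA_alt rnaseq
instance (rnaseq : String) (out : List String) : Decidable (Spec_expand_ambiguous_RNA rnaseq out) := by unfold Spec_expand_ambiguous_RNA; infer_instance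

-- ===== CLAIM (what is proved, stated in full; the proofs are below) =====
def Claim_equal_expand_ambiguous_RNA : Prop := ∀ (rnaseq : String), Dom_expand_ambiguous_RNA rnaseq → Spec_expand_ambiguous_RNA rnaseq (expand_ambiguous_RNA rnaseq)

-- ===== LEMMAS AND PROOFS =====

-- the _RNAze loop evaluates to this literal dict
theorem pv_rnamap_val : pvA_rnamapping = PySem.Dict.mk
    [('R', ['A', 'G']), ('Y', ['C', 'U']), ('S', ['G', 'C']), ('W', ['A', 'U']),
     ('K', ['G', 'U']), ('M', ['A', 'C']), ('B', ['C', 'G', 'U']), ('D', ['A', 'G', 'U']),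
     ('H', ['A', 'C', 'U']), ('V', ['A', 'C', 'G']), ('N', ['A', 'C', 'G', 'U'])] := by
  simp [pvA_rnamapping, pvA_mapping]
  rfl

-- per-position options as B computes them
def pvOpts (b : Char) : List Char := (pvB_ambig.get? b).getD [b]

-- the product of the per-position option lists, leftmost position slowest
def pvProd : List Char → List (List Char)
  | [] => [[]]
  | b :: rest => (pvOpts b).flatMap (fun j => (pvProd rest).map (j :: ·))

-- number of ambiguous bases
def pvAmb (s : List Char) : Nat := s.countP (· ∈ pvA_ambiguous)

-- finite facts about the two concrete tables (checked by case-wise evaluation)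
theorem pv_tbl : ∀ b ∈ pvA_ambiguous,
    (pvA_rnamapping.get? b).getD [] = pvOpts b ∧ pvOpts b ≠ [] ∧
    ∀ j ∈ pvOpts b, j ∉ pvA_ambiguous := by
  intro b hb
  fin_cases hb <;>
    (rw [pv_rnamap_val]
     simp [pvOpts, pvB_ambig, PySem.Dict.get?_mk_cons, pvA_ambiguous])

theorem pvB_keys : pvB_ambig.keys = pvA_ambiguous := rfl

theorem pv_opts_unamb (b : Char) (h : b ∉ pvA_ambiguous) : pvOpts b = [b] := by
  have hk : pvB_ambig.get? b = none := by
    rw [PySem.Dict.get?_eq_none_iff_not_mem_keys]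
    simpa [pvB_ambig, pvA_ambiguous] using h
  simp [pvOpts, hk]

theorem pv_get?_none (b : Char) (h : b ∉ pvA_ambiguous) : pvB_ambig.get? b = none := by
  rw [PySem.Dict.get?_eq_none_iff_not_mem_keys, pvB_keys]
  exact h

theorem pv_get?_amb (b : Char) (h : b ∈ pvA_ambiguous) :
    pvB_ambig.get? b = some (pvOpts b) := by
  cases hg : pvB_ambig.get? b with
  | none =>
    exact absurd h (by rw [← pvB_keys]; exact (PySem.Dict.get?_eq_none_iff_not_mem_keys _ _).mp hg)
  | some v =>
    unfold pvOpts
    rw [hg]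
    simp

theorem pv_amb_cons (b : Char) (s : List Char) :
    pvAmb (b :: s) = (if b ∈ pvA_ambiguous then 1 else 0) + pvAmb s := by
  by_cases h : b ∈ pvA_ambiguous <;> simp [pvAmb, List.countP_cons, h, Nat.add_comm]

theorem pv_amb_append (s t : List Char) : pvAmb (s ++ t) = pvAmb s + pvAmb t := by
  simp [pvAmb, List.countP_append]

theorem pv_amb_one (b : Char) (h : b ∉ pvA_ambiguous) : pvAmb [b] = 0 := by
  rw [pv_amb_cons, if_neg h]
  simp [pvAmb]

theorem pv_flatten_singleton {α : Type} (l : List α) :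
    (l.map (fun a => [a])).flatten = l := by
  induction l <;> simp_all

theorem pv_flatMap_singleton_map {α β : Type} (l : List α) (f : α → β) :
    l.flatMap (fun x => [f x]) = l.map f := by
  induction l <;> simp_all

theorem pvProd_unamb_prefix : ∀ (ns s : List Char), pvAmb ns = 0 →
    pvProd (ns ++ s) = (pvProd s).map (ns ++ ·) := by
  intro ns
  induction ns with
  | nil => intro s _; simp
  | cons c ns ih =>
    intro s h
    rw [pv_amb_cons] at h
    have hc : c ∉ pvA_ambiguous := by by_cases hc : c ∈ pvA_ambiguous <;> simp [hc] at h ⊢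
    have hns : pvAmb ns = 0 := by simpa [hc] using h
    have hstep : pvProd (c :: (ns ++ s)) = (pvProd (ns ++ s)).map (c :: ·) := by
      simp [pvProd, pv_opts_unamb c hc]
    rw [List.cons_append, hstep, ih s hns, List.map_map]
    rfl

theorem pvProd_unamb (s : List Char) (h : pvAmb s = 0) : pvProd s = [s] := by
  have := pvProd_unamb_prefix s [] h
  simpa [pvProd] using this

theorem pvA_spawn_nil : ∀ (s ns : List Char), pvAmb s = 0 → pvA_spawn s ns = [] := by
  intro s
  induction s with
  | nil => intro ns _; simp [pvA_spawn]
  | cons b rest ih =>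
    intro ns h
    rw [pv_amb_cons] at h
    have hb : b ∉ pvA_ambiguous := by by_cases hb : b ∈ pvA_ambiguous <;> simp [hb] at h ⊢
    have hr : pvAmb rest = 0 := by simpa [hb] using h
    simp [pvA_spawn, hb, ih _ hr]

-- the main characterisation of spawn_branch on a sequence with an ambiguous base
theorem pvA_spawn_char : ∀ (s ns : List Char), pvAmb ns = 0 → 0 < pvAmb s →
    pvA_spawn s ns ≠ [] ∧
    (∀ t ∈ pvA_spawn s ns, pvAmb t.toList = pvAmb s - 1) ∧
    (pvA_spawn s ns).flatMap (fun t => pvProd t.toList) = (pvProd s).map (ns ++ ·) := by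
  intro s
  induction s with
  | nil => intro ns _ hs; simp [pvAmb] at hs
  | cons b rest ih =>
    intro ns hns hs
    by_cases hb : b ∈ pvA_ambiguous
    · have hopts := pv_tbl b hb
      have hmap : pvA_spawn (b :: rest) ns =
          (pvOpts b).map (fun j => String.ofList (ns ++ [j] ++ rest)) := by
        simp only [pvA_spawn, if_pos hb, hopts.1]
        rw [PySem.List.foldl_append_eq_flatMap, List.nil_append,
          pv_flatMap_singleton_map]
      refine ⟨?_, ?_, ?_⟩
      · rw [hmap]
        intro hnil
        exact hopts.2.1 (by simpa using hnil)
      · intro t ht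
        rw [hmap] at ht
        obtain ⟨j, hj, rfl⟩ := List.mem_map.mp ht
        have hju : j ∉ pvA_ambiguous := hopts.2.2 j hj
        have e1 : pvAmb (ns ++ [j] ++ rest) = pvAmb ns + pvAmb [j] + pvAmb rest := by
          rw [pv_amb_append, pv_amb_append]
        rw [String.toList_ofList, e1, pv_amb_one j hju, hns, pv_amb_cons, if_pos hb]
        omega
      · rw [hmap, List.flatMap_map]
        have step : ∀ j ∈ pvOpts b,
            pvProd (String.ofList (ns ++ [j] ++ rest)).toList =
              (pvProd rest).map (fun t => ns ++ j :: t) := by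
          intro j hj
          have hju : j ∉ pvA_ambiguous := hopts.2.2 j hj
          rw [String.toList_ofList, List.append_assoc,
            pvProd_unamb_prefix ns ([j] ++ rest) hns]
          have hone : pvProd ([j] ++ rest) = (pvProd rest).map (j :: ·) := by
            simp [pvProd, pv_opts_unamb j hju]
          rw [hone, List.map_map]
          rfl
        rw [List.flatMap_def, List.map_congr_left step, ← List.flatMap_def]
        rw [show pvProd (b :: rest) =
            (pvOpts b).flatMap (fun j => (pvProd rest).map (j :: ·)) from rfl,
          List.map_flatMap]
        simp only [List.map_map, Function.comp_def]
    · rw [pv_amb_cons, if_neg hb] at hs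
      have hs' : 0 < pvAmb rest := by omega
      have hns' : pvAmb (ns ++ [b]) = 0 := by
        rw [pv_amb_append, hns, pv_amb_one b hb]
      obtain ⟨h1, h2, h3⟩ := ih (ns ++ [b]) hns' hs'
      have hspawn : pvA_spawn (b :: rest) ns = pvA_spawn rest (ns ++ [b]) := by
        simp [pvA_spawn, hb]
      refine ⟨by rw [hspawn]; exact h1, ?_, ?_⟩
      · intro t ht
        rw [hspawn] at ht
        rw [pv_amb_cons, if_neg hb]
        have := h2 t ht
        omega
      · rw [hspawn, h3]
        rw [show pvProd (b :: rest) = (pvProd rest).map (b :: ·) by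
          simp [pvProd, pv_opts_unamb b hb], List.map_map]
        apply List.map_congr_left
        intro t _
        simp [List.append_assoc]

theorem pvA_loop_char : ∀ (k fuel : Nat) (seqs : List String), k < fuel → seqs ≠ [] →
    (∀ t ∈ seqs, pvAmb t.toList = k) →
    pvA_loop fuel seqs = seqs.flatMap (fun t => (pvProd t.toList).map String.ofList) := by
  intro k
  induction k with
  | zero =>
    intro fuel seqs hf hne hall
    cases fuel with
    | zero => omega
    | succ fuel =>
      simp only [pvA_loop, if_pos (List.length_pos_iff.mpr hne)]
      have hnew : seqs.foldl (fun acc seq => acc ++ pvA_spawn seq.toList []) [] = [] := by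
        rw [PySem.List.foldl_append_eq_flatMap, List.nil_append, List.flatMap_def,
          List.map_congr_left (fun t ht => pvA_spawn_nil _ _ (hall t ht))]
        simp
      rw [hnew]
      simp only [List.length_nil, if_pos rfl]
      have h1 : ∀ t ∈ seqs, (pvProd t.toList).map String.ofList = [t] := by
        intro t ht
        rw [pvProd_unamb _ (hall t ht)]
        simp [String.ofList_toList]
      rw [List.flatMap_def, List.map_congr_left h1]
      exact (pv_flatten_singleton seqs).symm
  | succ k ih =>
    intro fuel seqs hf hne hall
    cases fuel with
    | zero => omega
    | succ fuel =>
      simp only [pvA_loop, if_pos (List.length_pos_iff.mpr hne)]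
      have hspawn : ∀ t ∈ seqs, pvA_spawn t.toList [] ≠ [] ∧
          (∀ u ∈ pvA_spawn t.toList [], pvAmb u.toList = k) ∧
          (pvA_spawn t.toList []).flatMap (fun u => pvProd u.toList) = pvProd t.toList := by
        intro t ht
        have hpos : 0 < pvAmb t.toList := by rw [hall t ht]; omega
        obtain ⟨a1, a2, a3⟩ := pvA_spawn_char t.toList [] (by simp [pvAmb]) hpos
        refine ⟨a1, fun u hu => by rw [a2 u hu, hall t ht]; omega, ?_⟩
        rw [a3]; simp
      have hfold : seqs.foldl (fun acc seq => acc ++ pvA_spawn seq.toList []) [] =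
          seqs.flatMap (fun seq => pvA_spawn seq.toList []) := by
        rw [PySem.List.foldl_append_eq_flatMap, List.nil_append]
      rw [hfold]
      have hnewne : seqs.flatMap (fun seq => pvA_spawn seq.toList []) ≠ [] := by
        obtain ⟨s0, tl, rfl⟩ : ∃ s0 tl, seqs = s0 :: tl := by
          cases seqs with
          | nil => exact absurd rfl hne
          | cons a l => exact ⟨a, l, rfl⟩
        obtain ⟨u, hu⟩ := List.exists_mem_of_ne_nil _ (hspawn s0 (by simp)).1
        intro hc
        have : u ∈ (s0 :: tl).flatMap (fun seq => pvA_spawn seq.toList []) :=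
          List.mem_flatMap.mpr ⟨s0, by simp, hu⟩
        simp [hc] at this
      rw [if_neg (fun h => hnewne (List.length_eq_zero_iff.mp h))]
      rw [ih fuel _ (by omega) hnewne
        (fun u hu => by
          obtain ⟨s, hs, hus⟩ := List.mem_flatMap.mp hu
          exact (hspawn s hs).2.1 u hus)]
      rw [List.flatMap_assoc, List.flatMap_def, List.flatMap_def]
      refine congrArg _ (List.map_congr_left fun t ht => ?_)
      rw [← List.map_flatMap, (hspawn t ht).2.2]

-- one product step of B's fold, seen on the final product
theorem pv_prod_step (b : Char) (rest : List Char) (acc : List (List Char)) :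
    (acc.flatMap (fun p => (pvOpts b).map (fun o => p ++ [o]))).flatMap
        (fun p => (pvProd rest).map (p ++ ·)) =
      acc.flatMap (fun p => (pvProd (b :: rest)).map (p ++ ·)) := by
  rw [List.flatMap_assoc]
  have hpt : ∀ p ∈ acc,
      ((pvOpts b).map (fun o => p ++ [o])).flatMap (fun q => (pvProd rest).map (q ++ ·)) =
        (pvProd (b :: rest)).map (p ++ ·) := by
    intro p _
    rw [List.flatMap_map]
    rw [show pvProd (b :: rest) =
        (pvOpts b).flatMap (fun j => (pvProd rest).map (j :: ·)) from rfl,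
      List.map_flatMap]
    rw [List.flatMap_def, List.flatMap_def]
    refine congrArg _ (List.map_congr_left fun o _ => ?_)
    rw [List.map_map]
    apply List.map_congr_left
    intro t _
    simp [List.append_assoc]
  rw [List.flatMap_def, List.map_congr_left hpt, ← List.flatMap_def]

-- the invariant of B's fold: partial products plus the ambiguity flag
theorem pv_alt_key : ∀ (s : List Char) (acc : List (List Char)) (flag : Bool),
    s.foldl
        (fun st b =>
          match pvB_ambig.get? b with
          | none => (st.1.flatMap (fun p => ([b] : List Char).map (fun o => p ++ [o])), st.2)
          | some opts => (st.1.flatMap (fun p => opts.map (fun o => p ++ [o])), true))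
        (acc, flag) =
      (acc.flatMap (fun p => (pvProd s).map (p ++ ·)), flag || decide (0 < pvAmb s)) := by
  intro s
  induction s with
  | nil =>
    intro acc flag
    simp [pvAmb, pvProd]
  | cons b rest ih =>
    intro acc flag
    by_cases hb : b ∈ pvA_ambiguous
    · rw [List.foldl_cons]
      simp only [pv_get?_amb b hb]
      rw [ih, pv_prod_step]
      refine congrArg _ ?_
      rw [pv_amb_cons, if_pos hb]
      simp
    · rw [List.foldl_cons]
      simp only [pv_get?_none b hb]
      rw [ih]
      rw [show ([b] : List Char) = pvOpts b from (pv_opts_unamb b hb).symm, pv_prod_step]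
      refine congrArg _ ?_
      rw [pv_amb_cons, if_neg hb]
      simp

theorem pv_alt_eq (rnaseq : String) :
    expand_ambiguous_RNA_alt rnaseq =
      if 0 < pvAmb rnaseq.toList then (pvProd rnaseq.toList).map String.ofList else [] := by
  unfold expand_ambiguous_RNA_alt
  rw [pv_alt_key]
  by_cases hpos : 0 < pvAmb rnaseq.toList <;> simp [hpos]

theorem pvA_val_amb (rnaseq : String) (hpos : 0 < pvAmb rnaseq.toList) :
    expand_ambiguous_RNA rnaseq = (pvProd rnaseq.toList).map String.ofList := by
  obtain ⟨a1, a2, a3⟩ := pvA_spawn_char rnaseq.toList [] (by simp [pvAmb]) hpos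
  have hle : pvAmb rnaseq.toList ≤ rnaseq.toList.length := List.countP_le_length
  unfold expand_ambiguous_RNA
  rw [pvA_loop_char (pvAmb rnaseq.toList - 1) _ _ (by omega) a1 a2]
  rw [← List.map_flatMap, a3]
  simp

-- ===== VERDICT (by name: the statement is the Claim_ definition above) =====
theorem expand_ambiguous_RNA_spec : Claim_equal_expand_ambiguous_RNA := by
  intro rnaseq _
  show expand_ambiguous_RNA rnaseq = expand_ambiguous_RNA_alt rnaseq
  by_cases hpos : 0 < pvAmb rnaseq.toList
  · rw [pvA_val_amb rnaseq hpos, pv_alt_eq, if_pos hpos]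
  · have h0 : pvAmb rnaseq.toList = 0 := by omega
    have hA : expand_ambiguous_RNA rnaseq = [] := by
      unfold expand_ambiguous_RNA
      rw [pvA_spawn_nil _ _ h0]
      simp [pvA_loop]
    rw [hA, pv_alt_eq, if_neg hpos]
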